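-- pv_equiv track=rewrite | github.com/Travis-coder712/aures-db | pipeline/importers/harvest_facility_metadata.py | extract_facility_dates
-- ===== SOURCE A (Python) =====
-- SPECIFICITY_MAP = {
--     'day': 'day',
--     'month': 'month',
--     'quarter': 'quarter',
--     'year': 'year',
-- }
--
-- def extract_facility_dates(facility):
--     """Extract key dates from a facility's units.
--
--     Returns dict with earliest commencement_date, data_first_seen, etc.
--     Uses the earliest date across all units of the facility.
--     """
--     dates = {}
--
--     for unit in facility.get('units', []):
--         # commencement_date (COD equivalent)
--         cd = unit.get('commencement_date')
--         cd_spec = unit.get('commencement_date_specificity', 'year')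
--         if cd:
--             if 'commencement_date' not in dates or cd < dates['commencement_date']['date']:
--                 dates['commencement_date'] = {
--                     'date': cd,
--                     'precision': SPECIFICITY_MAP.get(cd_spec, 'year'),
--                 }
--
--         # data_first_seen (first generation)
--         dfs = unit.get('data_first_seen')
--         if dfs:
--             if 'data_first_seen' not in dates or dfs < dates['data_first_seen']['date']:
--                 dates['data_first_seen'] = {
--                     'date': dfs,
--                     'precision': 'day',
--                 }
--
--         # construction_start_date
--         csd = unit.get('construction_start_date')
--         csd_spec = unit.get('construction_start_date_specificity', 'year')
--         if csd:
--             if 'construction_start_date' not in dates or csd < dates['construction_start_date']['date']: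
--                 dates['construction_start_date'] = {
--                     'date': csd,
--                     'precision': SPECIFICITY_MAP.get(csd_spec, 'year'),
--                 }
--
--         # project_approval_date
--         pad = unit.get('project_approval_date')
--         pad_spec = unit.get('project_approval_date_specificity', 'year')
--         if pad:
--             if 'project_approval_date' not in dates or pad < dates['project_approval_date']['date']:
--                 dates['project_approval_date'] = {
--                     'date': pad,
--                     'precision': SPECIFICITY_MAP.get(pad_spec, 'year'),
--                 }
--
--         # expected_closure_date
--         ecd = unit.get('expected_closure_date')
--         ecd_spec = unit.get('expected_closure_date_specificity', 'year')
--         if ecd: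
--             if 'expected_closure_date' not in dates or ecd < dates['expected_closure_date']['date']:
--                 dates['expected_closure_date'] = {
--                     'date': ecd,
--                     'precision': SPECIFICITY_MAP.get(ecd_spec, 'year'),
--                 }
--
--     return dates
-- ===== SOURCE B (Python) =====
-- SPECIFICITY_MAP = {
--     'day': 'day',
--     'month': 'month',
--     'quarter': 'quarter',
--     'year': 'year',
-- }
--
-- _DATE_FIELDS = ('commencement_date', 'data_first_seen', 'construction_start_date',
--                 'project_approval_date', 'expected_closure_date')
--
--
-- def extract_facility_dates(facility):
--     """Collect every candidate date per field, then reduce each list to its earliest."""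
--     candidates = {}
--     for unit in facility.get('units', []):
--         for field in _DATE_FIELDS:
--             value = unit.get(field)
--             if value:
--                 if field == 'data_first_seen':
--                     precision = 'day'
--                 else:
--                     precision = SPECIFICITY_MAP.get(unit.get(field + '_specificity', 'year'), 'year')
--                 candidates.setdefault(field, []).append({'date': value, 'precision': precision})
--     return {field: min(cands, key=lambda c: c['date']) for field, cands in candidates.items()}
-- ===== Notes on version B (the rewrite author's own statement) =====
-- stated objective: alternative
-- what changed: Replaces A's flat running-minimum pass with five near-identical inline branches by a build-then-reduce shape: one generic loop over the five field names collects every truthy candidate (with its precision) into per-field lists, and a second pass reduces each list with min(key=date), preserving first-appearance key order and first-wins ties.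
import Mathlib
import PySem

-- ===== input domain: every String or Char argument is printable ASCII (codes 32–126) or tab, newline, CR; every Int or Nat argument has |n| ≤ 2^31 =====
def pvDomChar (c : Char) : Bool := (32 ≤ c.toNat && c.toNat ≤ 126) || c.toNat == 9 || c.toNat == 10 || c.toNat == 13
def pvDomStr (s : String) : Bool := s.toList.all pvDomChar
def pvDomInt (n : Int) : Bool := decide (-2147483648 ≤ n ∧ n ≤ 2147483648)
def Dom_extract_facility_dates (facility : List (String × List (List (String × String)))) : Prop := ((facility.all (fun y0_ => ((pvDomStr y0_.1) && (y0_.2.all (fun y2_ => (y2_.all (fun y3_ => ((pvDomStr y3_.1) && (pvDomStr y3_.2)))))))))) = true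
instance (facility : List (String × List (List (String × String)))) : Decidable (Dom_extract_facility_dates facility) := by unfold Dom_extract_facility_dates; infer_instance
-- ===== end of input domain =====

-- B replaces A's flat running-minimum pass (five inline branches) by a build-then-reduce shape:
-- collect per-field candidate lists in one generic loop, then reduce each list with min; same values.

-- SPECIFICITY_MAP
def pvSpecMap : PySem.Dict String String :=
  PySem.Dict.ofList [("day", "day"), ("month", "month"), ("quarter", "quarter"), ("year", "year")]

-- Python truthiness of an Optional[str]: non-None and non-empty
def pvTruthy (o : Option String) : Bool :=
  match o with
  | some s => !(s == "")
  | none => false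

-- ===== PORT A =====
-- A's five-times-repeated block: 'if v: if field not in dates or v < dates[field]["date"]: dates[field] = {...}'
def pvFieldA (dates : PySem.Dict String (List (String × String))) (field : String)
    (v : Option String) (prec : String) : PySem.Dict String (List (String × String)) :=
  if pvTruthy v then
    match dates.get? field with
    | none => dates.insert field [("date", v.getD ""), ("precision", prec)]
    | some cur =>
      if v.getD "" < (PySem.Dict.mk cur).getD "date" "" then
        dates.insert field [("date", v.getD ""), ("precision", prec)]
      else dates
  else dates

def extract_facility_dates (facility : List (String × List (List (String × String)))) : List (String × List (String × String)) :=
  (((facility.lookup "units").getD []).foldl (fun dates unit =>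
    let d1 := pvFieldA dates "commencement_date" (unit.lookup "commencement_date")
                (pvSpecMap.getD ((unit.lookup "commencement_date_specificity").getD "year") "year")
    let d2 := pvFieldA d1 "data_first_seen" (unit.lookup "data_first_seen") "day"
    let d3 := pvFieldA d2 "construction_start_date" (unit.lookup "construction_start_date")
                (pvSpecMap.getD ((unit.lookup "construction_start_date_specificity").getD "year") "year")
    let d4 := pvFieldA d3 "project_approval_date" (unit.lookup "project_approval_date")
                (pvSpecMap.getD ((unit.lookup "project_approval_date_specificity").getD "year") "year")
    pvFieldA d4 "expected_closure_date" (unit.lookup "expected_closure_date")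
                (pvSpecMap.getD ((unit.lookup "expected_closure_date_specificity").getD "year") "year")
    ) PySem.Dict.empty).items

-- ===== PORT B =====
def pvDateFields : List String :=
  ["commencement_date", "data_first_seen", "construction_start_date",
   "project_approval_date", "expected_closure_date"]

-- key used by min(cands, key=lambda c: c['date']); the 'date' key is always present in what B builds
def pvKey (c : List (String × String)) : String := (PySem.Dict.mk c).getD "date" ""

-- min(cands, key=lambda c: c['date']); only applied to non-empty lists
def pvBest (cands : List (List (String × String))) : List (String × String) :=
  (PySem.List.min? cands pvKey).getD []

-- the body of B's inner loop over the five field names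
def pvFieldB (cands : PySem.Dict String (List (List (String × String)))) (unit : List (String × String))
    (field : String) : PySem.Dict String (List (List (String × String))) :=
  let v := unit.lookup field
  if pvTruthy v then
    let prec := if field == "data_first_seen" then "day"
                else pvSpecMap.getD ((unit.lookup (field ++ "_specificity")).getD "year") "year"
    cands.modify field [] (· ++ [[("date", v.getD ""), ("precision", prec)]])
  else cands

def extract_facility_dates_alt (facility : List (String × List (List (String × String)))) : List (String × List (String × String)) :=
  let cands := ((facility.lookup "units").getD []).foldl (fun cands unit =>
      pvDateFields.foldl (fun cands field => pvFieldB cands unit field) cands) PySem.Dict.empty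
  cands.items.map (fun p => (p.1, pvBest p.2))

-- ===== PRECONDITION & SPEC =====
def Spec_extract_facility_dates (facility : List (String × List (List (String × String)))) (out : List (String × List (String × String))) : Prop := out = extract_facility_dates_alt facility
instance (facility : List (String × List (List (String × String)))) (out : List (String × List (String × String))) : Decidable (Spec_extract_facility_dates facility out) := by unfold Spec_extract_facility_dates; infer_instance

-- ===== CLAIM (what is proved, stated in full; the proofs are below) =====
def Claim_equal_extract_facility_dates : Prop := ∀ (facility : List (String × List (List (String × String)))), Dom_extract_facility_dates facility → Spec_extract_facility_dates facility (extract_facility_dates facility)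

-- ===== LEMMAS AND PROOFS =====

-- invariant: A's running-minimum dict is the min-reduction of B's candidate dict
def pvRel (d : PySem.Dict String (List (String × String)))
    (c : PySem.Dict String (List (List (String × String)))) : Prop :=
  c.keys.Nodup ∧ (∀ p ∈ c.items, p.2 ≠ []) ∧ d.items = c.items.map (fun p => (p.1, pvBest p.2))

theorem pvRel_keys {d c} (h : pvRel d c) : d.keys = c.keys := by
  obtain ⟨-, -, hi⟩ := h
  simp [PySem.Dict.keys, hi]

theorem pvMin?_append_some (l : List (List (String × String))) (x m : List (String × String))
    (hm : PySem.List.min? l pvKey = some m) :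
    PySem.List.min? (l ++ [x]) pvKey = if pvKey x < pvKey m then some x else some m := by
  simp only [PySem.List.min?] at hm ⊢
  rw [List.foldl_append, hm]
  rfl

theorem pvBest_singleton (x : List (String × String)) : pvBest [x] = x := rfl

theorem pvBest_append (l : List (List (String × String))) (x : List (String × String)) (hl : l ≠ []) :
    pvBest (l ++ [x]) = if pvKey x < pvKey (pvBest l) then x else pvBest l := by
  obtain ⟨m, hm⟩ : ∃ m, PySem.List.min? l pvKey = some m := by
    cases ho : PySem.List.min? l pvKey with
    | none => exact absurd ((PySem.List.min?_eq_none_iff l pvKey).1 ho) hl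
    | some m => exact ⟨m, rfl⟩
  rw [pvBest, pvBest, pvMin?_append_some l x m hm, hm]
  by_cases hx : pvKey x < pvKey m <;> simp [hx]

theorem pvKey_mk (s p : String) : pvKey [("date", s), ("precision", p)] = s := by
  simp [pvKey, PySem.Dict.getD_eq_get?_getD, PySem.Dict.get?_mk_cons]

-- uniqueness of an item with a given key in a nodup-keys dict
theorem pvItem_unique {c : PySem.Dict String (List (List (String × String)))}
    (hnd : c.keys.Nodup) {f : String} {l : List (List (String × String))}
    (hl : c.get? f = some l) {p : String × List (List (String × String))}
    (hp : p ∈ c.items) (hpf : p.1 = f) : p = (f, l) := by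
  have : c.get? p.1 = some p.2 := (PySem.Dict.get?_eq_some_iff_mem_items c p.1 p.2 hnd).2 (by simpa using hp)
  rw [hpf, hl] at this
  exact Prod.ext hpf (by simpa using this.symm)

-- one field step preserves the invariant
theorem pvRel_step (d : PySem.Dict String (List (String × String)))
    (c : PySem.Dict String (List (List (String × String)))) (f : String)
    (v : Option String) (prec : String) (h : pvRel d c) :
    pvRel (pvFieldA d f v prec)
      (if pvTruthy v then c.modify f [] (· ++ [[("date", v.getD ""), ("precision", prec)]]) else c) := by
  by_cases ht : pvTruthy v
  · obtain ⟨hnd, hne, hi⟩ := h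
    have hkeys : d.keys = c.keys := pvRel_keys ⟨hnd, hne, hi⟩
    simp only [ht, if_true, PySem.Dict.modify]
    by_cases hc : c.contains f = true
    · -- field already present: A compares with the current minimum, B appends a candidate
      obtain ⟨l, hl⟩ : ∃ l, c.get? f = some l := by
        have := (PySem.Dict.contains_iff_mem_keys c f).1 hc
        rcases ho : c.get? f with _ | l
        · exact absurd ((PySem.Dict.get?_eq_none_iff_not_mem_keys c f).1 ho) (by simpa using this)
        · exact ⟨l, rfl⟩
      have hlin : (f, l) ∈ c.items := (PySem.Dict.get?_eq_some_iff_mem_items c f l hnd).1 hl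
      have hlne : l ≠ [] := hne _ hlin
      have hgd : c.getD f [] = l := by rw [PySem.Dict.getD_eq_get?_getD, hl]; rfl
      have hdnd : d.keys.Nodup := hkeys ▸ hnd
      have hdc : d.contains f = true := by
        rw [PySem.Dict.contains_iff_mem_keys, hkeys, ← PySem.Dict.contains_iff_mem_keys]; exact hc
      have hdg : d.get? f = some (pvBest l) :=
        PySem.Dict.get?_of_mem_items d (by rw [hi]; exact List.mem_map_of_mem hlin) hdnd
      have hbest : pvBest (l ++ [[("date", v.getD ""), ("precision", prec)]])
          = if v.getD "" < pvKey (pvBest l) then [("date", v.getD ""), ("precision", prec)]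
            else pvBest l := by
        rw [pvBest_append l _ hlne, pvKey_mk]
      have hkeysC : (c.insert f (c.getD f [] ++ [[("date", v.getD ""), ("precision", prec)]])).keys = c.keys :=
        PySem.Dict.keys_insert_of_contains c _ hc
      refine ⟨hkeysC ▸ hnd, ?_, ?_⟩
      · intro p hp
        rw [hgd, PySem.Dict.items_insert_of_contains c _ hc] at hp
        obtain ⟨q, hq, rfl⟩ := List.mem_map.1 hp
        split
        · simp
        · exact hne _ hq
      · simp only [pvFieldA, ht, if_true, hdg]
        have hAkey : (PySem.Dict.mk (pvBest l)).getD "date" "" = pvKey (pvBest l) := rfl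
        rw [hgd, PySem.Dict.items_insert_of_contains c _ hc, List.map_map, hAkey]
        by_cases hlt : v.getD "" < pvKey (pvBest l)
        · rw [if_pos hlt, PySem.Dict.items_insert_of_contains d _ hdc, hi, List.map_map]
          refine List.map_congr_left fun p hp => ?_
          by_cases hpf : p.1 = f <;>
            simp [Function.comp, hpf, hbest, hlt]
        · rw [if_neg hlt, hi]
          refine List.map_congr_left fun p hp => ?_
          by_cases hpf : p.1 = f
          · have := pvItem_unique hnd hl hp hpf
            subst this
            simp [Function.comp, hbest, hlt]
          · simp [Function.comp, hpf]
    · -- fresh field: both sides append a new entry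
      have hcf : c.contains f = false := by simpa using hc
      have hdg : d.get? f = none := by
        rw [PySem.Dict.get?_eq_none_iff_not_mem_keys, hkeys]
        simpa using (fun hm => hc ((PySem.Dict.contains_iff_mem_keys c f).2 hm))
      have hdc : d.contains f = false := by
        have := (PySem.Dict.get?_eq_none_iff_not_mem_keys d f).1 hdg
        simpa using (fun hm => this ((PySem.Dict.contains_iff_mem_keys d f).1 hm))
      have hgd : c.getD f [] = [] := PySem.Dict.getD_of_not_contains c _ hcf
      refine ⟨?_, ?_, ?_⟩
      · rw [hgd, PySem.Dict.keys_insert_of_not_contains c _ hcf]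
        refine List.Nodup.append hnd (List.nodup_singleton f) ?_
        intro a ha hb
        rw [List.mem_singleton] at hb
        subst hb
        exact hc ((PySem.Dict.contains_iff_mem_keys c a).2 ha)
      · intro p hp
        rw [hgd, PySem.Dict.items_insert_of_not_contains c _ hcf] at hp
        rcases List.mem_append.1 hp with hp | hp
        · exact hne _ hp
        · rw [List.mem_singleton] at hp; subst hp; simp
      · simp only [pvFieldA, ht, if_true, hdg]
        rw [hgd, PySem.Dict.items_insert_of_not_contains c _ hcf,
            PySem.Dict.items_insert_of_not_contains d _ hdc, List.map_append, hi]
        simp [pvBest_singleton]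
  · simpa [pvFieldA, ht] using h

-- B's inner loop body at each concrete field name matches the generic step
theorem pvFieldB_eq (c : PySem.Dict String (List (List (String × String))))
    (unit : List (String × String)) (f : String) :
    pvFieldB c unit f
      = (if pvTruthy (unit.lookup f) then
          c.modify f [] (· ++ [[("date", (unit.lookup f).getD ""),
            ("precision", if f == "data_first_seen" then "day"
              else pvSpecMap.getD ((unit.lookup (f ++ "_specificity")).getD "year") "year")]])
        else c) := rfl

-- one whole unit preserves the invariant
theorem pvRel_unit (d : PySem.Dict String (List (String × String)))
    (c : PySem.Dict String (List (List (String × String)))) (unit : List (String × String))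
    (h : pvRel d c) :
    pvRel
      (pvFieldA (pvFieldA (pvFieldA (pvFieldA (pvFieldA d "commencement_date" (unit.lookup "commencement_date")
          (pvSpecMap.getD ((unit.lookup "commencement_date_specificity").getD "year") "year"))
        "data_first_seen" (unit.lookup "data_first_seen") "day")
        "construction_start_date" (unit.lookup "construction_start_date")
          (pvSpecMap.getD ((unit.lookup "construction_start_date_specificity").getD "year") "year"))
        "project_approval_date" (unit.lookup "project_approval_date")
          (pvSpecMap.getD ((unit.lookup "project_approval_date_specificity").getD "year") "year"))
        "expected_closure_date" (unit.lookup "expected_closure_date")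
          (pvSpecMap.getD ((unit.lookup "expected_closure_date_specificity").getD "year") "year"))
      (pvDateFields.foldl (fun cands field => pvFieldB cands unit field) c) := by
  simp only [pvDateFields, List.foldl, pvFieldB_eq]
  have e1 : (("commencement_date" : String) ++ "_specificity") = "commencement_date_specificity" := rfl
  have e3 : (("construction_start_date" : String) ++ "_specificity") = "construction_start_date_specificity" := rfl
  have e4 : (("project_approval_date" : String) ++ "_specificity") = "project_approval_date_specificity" := rfl
  have e5 : (("expected_closure_date" : String) ++ "_specificity") = "expected_closure_date_specificity" := rfl
  rw [e1, e3, e4, e5]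
  simp only [show (("commencement_date" : String) == "data_first_seen") = false from rfl,
    show (("data_first_seen" : String) == "data_first_seen") = true from rfl,
    show (("construction_start_date" : String) == "data_first_seen") = false from rfl,
    show (("project_approval_date" : String) == "data_first_seen") = false from rfl,
    show (("expected_closure_date" : String) == "data_first_seen") = false from rfl,
    Bool.false_eq_true, if_false, if_true]
  exact pvRel_step _ _ _ _ _ (pvRel_step _ _ _ _ _ (pvRel_step _ _ _ _ _
    (pvRel_step _ _ _ _ _ (pvRel_step _ _ _ _ _ h))))

theorem pvRel_fold (units : List (List (String × String)))
    (d : PySem.Dict String (List (String × String)))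
    (c : PySem.Dict String (List (List (String × String)))) (h : pvRel d c) :
    pvRel
      (units.foldl (fun dates unit =>
        let d1 := pvFieldA dates "commencement_date" (unit.lookup "commencement_date")
                    (pvSpecMap.getD ((unit.lookup "commencement_date_specificity").getD "year") "year")
        let d2 := pvFieldA d1 "data_first_seen" (unit.lookup "data_first_seen") "day"
        let d3 := pvFieldA d2 "construction_start_date" (unit.lookup "construction_start_date")
                    (pvSpecMap.getD ((unit.lookup "construction_start_date_specificity").getD "year") "year")
        let d4 := pvFieldA d3 "project_approval_date" (unit.lookup "project_approval_date")
                    (pvSpecMap.getD ((unit.lookup "project_approval_date_specificity").getD "year") "year")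
        pvFieldA d4 "expected_closure_date" (unit.lookup "expected_closure_date")
                    (pvSpecMap.getD ((unit.lookup "expected_closure_date_specificity").getD "year") "year")) d)
      (units.foldl (fun cands unit =>
        pvDateFields.foldl (fun cands field => pvFieldB cands unit field) cands) c) := by
  induction units generalizing d c with
  | nil => exact h
  | cons u us ih => exact ih _ _ (pvRel_unit d c u h)

-- ===== VERDICT (by name: the statement is the Claim_ definition above) =====
theorem extract_facility_dates_spec : Claim_equal_extract_facility_dates := by
  intro facility _
  unfold Spec_extract_facility_dates extract_facility_dates extract_facility_dates_alt
  exact (pvRel_fold ((facility.lookup "units").getD []) PySem.Dict.empty PySem.Dict.empty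
    ⟨by simp [PySem.Dict.empty, PySem.Dict.keys], by simp [PySem.Dict.empty], by simp [PySem.Dict.empty]⟩).2.2
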